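-- pv_equiv track=rewrite | github.com/rayskiy7/playground | py/g.py | rbin
-- ===== SOURCE A (Python) =====
-- import math
--
-- def rbin (a):
--     if not type(a) is int:
--         raise TypeError
--     l = (int(math.log(abs(a),2)) if a!=0 else 0)
--     r = l//4+1+1 # 1 additional more
--     mask = int('F'*r,16)
--     a&=mask
--     bins = '{0:0{1}b}'.format(a,r*4)
--     res = ''
--     for i in range(r):
--         res+=bins[:4]+' '
--         bins=bins[4:]
--     return res[:-1]
-- ===== SOURCE B (Python) =====
-- import math
--
-- def rbin(a):
--     if not type(a) is int:
--         raise TypeError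
--     l = (int(math.log(abs(a), 2)) if a != 0 else 0)
--     r = l // 4 + 1 + 1
--     a &= (1 << (4 * r)) - 1
--     groups = []
--     for i in range(r - 1, -1, -1):
--         groups.append('{:04b}'.format((a >> (4 * i)) & 0xF))
--     return ' '.join(groups)
-- ===== Notes on version B (the rewrite author's own statement) =====
-- stated objective: alternative
-- what changed: B extracts each nibble arithmetically by shifting and masking, formats it as a four-digit binary group, and joins the groups with a space, instead of formatting the whole masked value into one zero-padded binary string and repeatedly slicing off chunks; B also builds the mask by a left shift rather than parsing a repeated-hex-digit string.
import Mathlib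
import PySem

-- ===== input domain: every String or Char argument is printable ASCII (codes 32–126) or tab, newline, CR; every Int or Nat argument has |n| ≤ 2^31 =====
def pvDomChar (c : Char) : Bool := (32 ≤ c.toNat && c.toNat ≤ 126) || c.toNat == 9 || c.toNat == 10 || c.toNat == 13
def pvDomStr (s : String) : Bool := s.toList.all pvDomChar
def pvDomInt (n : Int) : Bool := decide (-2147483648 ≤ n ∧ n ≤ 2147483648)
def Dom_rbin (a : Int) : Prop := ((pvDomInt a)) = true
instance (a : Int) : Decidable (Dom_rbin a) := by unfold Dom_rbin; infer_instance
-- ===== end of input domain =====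

-- B formats the masked value nibble-by-nibble via shift/mask and joins, instead of slicing one big padded binary string in a loop (objective: alternative decomposition, same cost).


-- ===== PORT A =====
def rbin (a : Int) : String :=
  -- 'type(a) is int' always holds for a : Int, so the TypeError branch is dead
  -- int(math.log(abs(a),2)) is ported as bitLength - 1: exact for 1 ≤ |a| ≤ 2^31 (the whole Dom),
  -- where CPython's float log never crosses an integer boundary (checked against CPython)
  let l : Int := if a ≠ 0 then (PySem.Int.bitLength a : Int) - 1 else 0
  let r : Int := PySem.Int.floordiv l 4 + 1 + 1
  let mask : Int := 16 ^ r.toNat - 1                 -- int('F'*r, 16) = 16^r - 1; r ≥ 2 always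
  let a2 : Int := PySem.Int.band a mask
  -- '{0:0{1}b}'.format(a, r*4): a2 ≥ 0 here, so this is its binary digits left-padded with '0' to width r*4
  let bins : List Char :=
    List.replicate ((r * 4).toNat - (PySem.Int.toBinChars a2).length) '0' ++ PySem.Int.toBinChars a2
  let st := (PySem.List.pyRange 0 r 1).foldl
      (fun (st : List Char × List Char) (_i : Int) =>
        (st.1 ++ PySem.Chars.slice st.2 none (some 4) ++ [' '], PySem.Chars.slice st.2 (some 4) none))
      ([], bins)
  String.ofList (PySem.Chars.slice st.1 none (some (-1)))

-- ===== PORT B =====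
-- '{:04b}'.format((a >> (4*i)) & 0xF): the nibble's binary digits left-padded with '0' to width 4 (i ≥ 0 always)
def nibbleGroup (a2 : Int) (i : Int) : String :=
  let nib : Int := PySem.Int.band (a2 >>> (4 * i).toNat) 15
  String.ofList (List.replicate (4 - (PySem.Int.toBinChars nib).length) '0' ++ PySem.Int.toBinChars nib)

def rbin_alt (a : Int) : String :=
  let l : Int := if a ≠ 0 then (PySem.Int.bitLength a : Int) - 1 else 0
  let r : Int := PySem.Int.floordiv l 4 + 1 + 1
  let a2 : Int := PySem.Int.band a ((1 : Int) <<< (4 * r).toNat - 1)   -- a &= (1 << (4*r)) - 1; r ≥ 2 always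
  let groups : List String := (PySem.List.pyRange (r - 1) (-1) (-1)).map (nibbleGroup a2)
  PySem.Str.join " " groups

-- ===== PRECONDITION & SPEC =====
def Spec_rbin (a : Int) (out : String) : Prop := out = rbin_alt a
instance (a : Int) (out : String) : Decidable (Spec_rbin a out) := by unfold Spec_rbin; infer_instance

-- ===== CLAIM (what is proved, stated in full; the proofs are below) =====
def Claim_equal_rbin : Prop := ∀ (a : Int), Dom_rbin a → Spec_rbin a (rbin a)

-- ===== LEMMAS AND PROOFS =====

-- binary digit list of a Nat, MSB first (what Nat.toDigits 2 computes)
def bits (n : Nat) : List Char :=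
  if n < 2 then [Nat.digitChar n] else bits (n / 2) ++ [Nat.digitChar (n % 2)]
  decreasing_by omega

lemma toDigitsCore_eq_bits : ∀ (f n : Nat) (acc : List Char), n < f →
    Nat.toDigitsCore 2 f n acc = bits n ++ acc := by
  intro f
  induction f with
  | zero => intro n acc h; omega
  | succ f ih =>
    intro n acc h
    rw [Nat.toDigitsCore]
    by_cases h2 : n < 2
    · have hb : bits n = [Nat.digitChar n] := by rw [bits]; simp [h2]
      have : n / 2 = 0 := by omega
      simp only [this, if_true, hb]
      rw [Nat.mod_eq_of_lt h2]
      rfl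
    · have hb : bits n = bits (n / 2) ++ [Nat.digitChar (n % 2)] := by rw [bits]; simp [h2]
      have hdiv : ¬ n / 2 = 0 := by omega
      simp only [hdiv, if_false]
      rw [ih (n / 2) _ (by omega), hb]
      simp

lemma toDigits_eq_bits (n : Nat) : Nat.toDigits 2 n = bits n := by
  rw [Nat.toDigits, toDigitsCore_eq_bits (n + 1) n [] (by omega)]
  simp

lemma toBinChars_natCast (q : Nat) : PySem.Int.toBinChars (q : Int) = bits q := by
  simp [PySem.Int.toBinChars, toDigits_eq_bits]

-- the low w binary digits of m, MSB first ('{:0wb}' for m < 2^w)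
def pbits : Nat → Nat → List Char
  | 0, _ => []
  | w + 1, m => pbits w (m / 2) ++ [Nat.digitChar (m % 2)]

lemma length_pbits (w m : Nat) : (pbits w m).length = w := by
  induction w generalizing m with
  | zero => rfl
  | succ w ih => simp [pbits, ih]

lemma pbits_zero (w : Nat) : pbits w 0 = List.replicate w '0' := by
  induction w with
  | zero => rfl
  | succ w ih =>
    show pbits w 0 ++ [Nat.digitChar 0] = _
    rw [ih]
    simp [Nat.digitChar, List.replicate_succ']

lemma pad_bits (w m : Nat) (hw : 1 ≤ w) (hm : m < 2 ^ w) :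
    List.replicate (w - (bits m).length) '0' ++ bits m = pbits w m := by
  induction w generalizing m with
  | zero => omega
  | succ w ih =>
    by_cases hw1 : w = 0
    · subst hw1
      have : m < 2 := by simpa using hm
      rw [bits]
      simp [this, pbits, Nat.mod_eq_of_lt this]
    · by_cases h2 : m < 2
      · rw [bits]
        simp only [h2, if_true]
        have hd : m / 2 = 0 := by omega
        show List.replicate (w + 1 - 1) '0' ++ [Nat.digitChar m] = pbits w (m / 2) ++ [Nat.digitChar (m % 2)]
        rw [hd, pbits_zero, Nat.mod_eq_of_lt h2]
        simp
      · rw [bits]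
        simp only [h2, if_false]
        have hlen : (bits (m / 2) ++ [Nat.digitChar (m % 2)]).length = (bits (m / 2)).length + 1 := by simp
        rw [hlen]
        show List.replicate (w + 1 - ((bits (m / 2)).length + 1)) '0' ++ (bits (m / 2) ++ [Nat.digitChar (m % 2)]) = pbits w (m / 2) ++ [Nat.digitChar (m % 2)]
        have : w + 1 - ((bits (m / 2)).length + 1) = w - (bits (m / 2)).length := by omega
        rw [this, ← List.append_assoc, ih (m / 2) (by omega) (by omega)]

lemma pbits_add (u v m : Nat) : pbits (u + v) m = pbits u (m / 2 ^ v) ++ pbits v m := by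
  induction v generalizing m with
  | zero => simp [pbits]
  | succ v ih =>
    have h1 : u + (v + 1) = (u + v) + 1 := by omega
    rw [h1]
    show pbits (u + v) (m / 2) ++ [Nat.digitChar (m % 2)] = pbits u (m / 2 ^ (v + 1)) ++ (pbits v (m / 2) ++ [Nat.digitChar (m % 2)])
    rw [ih (m / 2), ← List.append_assoc]
    have : m / 2 / 2 ^ v = m / 2 ^ (v + 1) := by
      rw [Nat.div_div_eq_div_mul, pow_succ']
    rw [this]

lemma pbits_mod (w m : Nat) : pbits w (m % 2 ^ w) = pbits w m := by
  induction w generalizing m with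
  | zero => rfl
  | succ w ih =>
    show pbits w (m % 2 ^ (w + 1) / 2) ++ [Nat.digitChar (m % 2 ^ (w + 1) % 2)] = pbits w (m / 2) ++ [Nat.digitChar (m % 2)]
    have h1 : m % 2 ^ (w + 1) / 2 = m / 2 % 2 ^ w := by
      rw [pow_succ']
      exact Nat.mod_mul_right_div_self m 2 (2 ^ w)
    have h2 : m % 2 ^ (w + 1) % 2 = m % 2 := by
      apply Nat.mod_mod_of_dvd
      exact ⟨2 ^ w, by rw [pow_succ']⟩
    rw [h1, h2, ih]

-- what A's loop accumulates: r chunks of 4 chars, each followed by a space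
def chop : Nat → List Char → List Char
  | 0, _ => []
  | k + 1, cs => cs.take 4 ++ [' '] ++ chop k (cs.drop 4)

lemma loopA (is : List Int) (res bins : List Char) :
    ((is.foldl
      (fun (st : List Char × List Char) (_i : Int) =>
        (st.1 ++ PySem.Chars.slice st.2 none (some 4) ++ [' '], PySem.Chars.slice st.2 (some 4) none))
      (res, bins)).1 : List Char) = res ++ chop is.length bins := by
  induction is generalizing res bins with
  | nil => simp [chop]
  | cons i is ih =>
    rw [List.foldl_cons, ih]
    have h4 : PySem.Chars.slice bins none (some 4) = bins.take 4 := by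
      have := PySem.List.slice_to_natCast (xs := bins) (b := 4)
      rw [PySem.Chars.slice]
      simpa using this
    have h4' : PySem.Chars.slice bins (some 4) none = bins.drop 4 := by
      have := PySem.List.slice_from_natCast (xs := bins) (a := 4)
      rw [PySem.Chars.slice]
      simpa using this
    rw [h4, h4']
    simp [chop]

-- the r nibble groups, MSB first
def groupsL : Nat → Nat → List (List Char)
  | 0, _ => []
  | r + 1, m => pbits 4 (m / 2 ^ (4 * r)) :: groupsL r m

lemma groupsL_ne_nil (r m : Nat) (hr : 1 ≤ r) : groupsL r m ≠ [] := by
  cases r with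
  | zero => omega
  | succ r => simp [groupsL]

lemma chop_pbits (r m : Nat) : chop r (pbits (4 * r) m) = ((groupsL r m).map (· ++ [' '])).flatten := by
  induction r generalizing m with
  | zero => simp [chop, groupsL]
  | succ r ih =>
    have hsplit : pbits (4 * (r + 1)) m = pbits 4 (m / 2 ^ (4 * r)) ++ pbits (4 * r) m := by
      have : 4 * (r + 1) = 4 + 4 * r := by omega
      rw [this, pbits_add]
    rw [hsplit]
    show (pbits 4 (m / 2 ^ (4 * r)) ++ pbits (4 * r) m).take 4 ++ [' ']
        ++ chop r ((pbits 4 (m / 2 ^ (4 * r)) ++ pbits (4 * r) m).drop 4) = _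
    have hlen : (pbits 4 (m / 2 ^ (4 * r))).length = 4 := length_pbits 4 _
    rw [List.take_append_of_le_length (by omega), List.drop_append_of_le_length (by omega)]
    rw [List.take_of_length_le (by omega), List.drop_of_length_le (by omega)]
    simp only [List.nil_append]
    rw [ih]
    show _ = ((pbits 4 (m / 2 ^ (4 * r)) ++ [' ']) :: (groupsL r m).map (· ++ [' '])).flatten
    simp

lemma dropLast_join (L : List (List Char)) (hL : L ≠ []) :
    ((L.map (· ++ [' '])).flatten).dropLast = PySem.Chars.join [' '] L := by
  induction L with
  | nil => simp at hL
  | cons x t ih =>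
    cases t with
    | nil =>
      show ((x ++ [' ']) :: []).flatten.dropLast = _
      rw [PySem.Chars.join_singleton]
      simp
    | cons y t2 =>
      have hne : ((((y :: t2)).map (· ++ [' '])).flatten) ≠ [] := by simp
      show ((x ++ [' ']) :: (((y :: t2)).map (· ++ [' ']))).flatten.dropLast = _
      rw [List.flatten_cons, List.dropLast_append_of_ne_nil hne, ih (by simp)]
      rw [PySem.Chars.join_cons_cons]

-- B's group list, as lists of chars, equals groupsL
lemma bgroups_eq (r : Nat) (m : Nat) :
    (PySem.List.pyRange ((r : Int) - 1) (-1) (-1)).map (fun i => (nibbleGroup (m : Int) i).toList)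
      = groupsL r m := by
  induction r with
  | zero =>
    rw [PySem.List.pyRange_neg_one_eq_nil (by omega)]
    rfl
  | succ r ih =>
    have hcons : PySem.List.pyRange ((↑(r + 1) : Int) - 1) (-1) (-1)
        = ((r : Int)) :: PySem.List.pyRange ((r : Int) - 1) (-1) (-1) := by
      have h := PySem.List.pyRange_neg_one_cons (a := ((r + 1 : Nat) : Int) - 1) (b := -1) (by push_cast; omega)
      have : ((r + 1 : Nat) : Int) - 1 = (r : Int) := by push_cast; omega
      rw [this] at h
      rw [show ((r + 1 : Nat) : Int) - 1 = (r : Int) by push_cast; omega, h]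
    rw [hcons, List.map_cons, ih]
    show (nibbleGroup (m : Int) (r : Int)).toList :: _ = pbits 4 (m / 2 ^ (4 * r)) :: _
    congr 1
    show (String.ofList (List.replicate (4 - (PySem.Int.toBinChars (PySem.Int.band ((m : Int) >>> ((4 : Int) * (r : Int)).toNat) 15)).length) '0'
      ++ PySem.Int.toBinChars (PySem.Int.band ((m : Int) >>> ((4 : Int) * (r : Int)).toNat) 15))).toList = _
    have hk : ((4 : Int) * (r : Int)).toNat = 4 * r := by
      omega
    have hshift : (m : Int) >>> (4 * r) = ((m >>> (4 * r) : Nat) : Int) := by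
      exact Int.mem_toNat?.mp rfl
    have hnib : PySem.Int.band ((m : Int) >>> ((4 : Int) * (r : Int)).toNat) 15
        = ((m / 2 ^ (4 * r) % 16 : Nat) : Int) := by
      rw [hk, hshift]
      rw [show (15 : Int) = ((15 : Nat) : Int) by rfl, PySem.Int.band_natCast]
      congr 1
      rw [Nat.shiftRight_eq_div_pow]
      have : (15 : Nat) = 2 ^ 4 - 1 := by rfl
      rw [this, Nat.and_two_pow_sub_one_eq_mod]
    rw [hnib]
    have htb : PySem.Int.toBinChars ((m / 2 ^ (4 * r) % 16 : Nat) : Int) = bits (m / 2 ^ (4 * r) % 16) := by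
      have h := toBinChars_natCast (m / 2 ^ (4 * r) % 16)
      rw [h]
    rw [htb]
    have := pad_bits 4 (m / 2 ^ (4 * r) % 16) (by omega) (by have := Nat.mod_lt (m / 2 ^ (4 * r)) (y := 16) (by omega); omega)
    simp only [String.toList_ofList]
    rw [this]
    have h16 : (16 : Nat) = 2 ^ 4 := by rfl
    rw [h16, pbits_mod]

lemma band_nonneg_le (x : Int) (k : Nat) :
    0 ≤ PySem.Int.band x ((2 ^ k : Nat) - 1 : Int) ∧ PySem.Int.band x ((2 ^ k : Nat) - 1 : Int) ≤ ((2 ^ k : Nat) - 1 : Int) := by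
  have hmask : ((2 ^ k : Nat) - 1 : Int) = (((2 ^ k - 1 : Nat)) : Int) := by
    have : 1 ≤ 2 ^ k := Nat.one_le_two_pow
    push_cast [this]
    ring
  rw [hmask]
  rw [PySem.Int.band]
  by_cases hx : 0 ≤ x
  · simp only [hx, if_true]
    have h0 : (0 : Int) ≤ ((2 ^ k - 1 : Nat) : Int) := by positivity
    simp only [h0, if_true]
    constructor
    · positivity
    · exact_mod_cast Nat.cast_le.mpr (Nat.and_le_right)
  · simp only [hx, if_false]
    have h0 : (0 : Int) ≤ ((2 ^ k - 1 : Nat) : Int) := by positivity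
    simp only [h0, if_true]
    constructor
    · positivity
    · have ht : ((2 ^ k - 1 : Nat) : Int).toNat = 2 ^ k - 1 := Int.toNat_natCast _
      rw [ht]
      exact_mod_cast Nat.cast_le.mpr (Nat.sub_le _ _)

-- the shared core: for any r ≥ 1 and masked value m < 2^(4r), A's string build equals B's
lemma core_eq (rn : Nat) (hrn : 1 ≤ rn) (m : Nat) (hm : m < 2 ^ (4 * rn)) :
    String.ofList (PySem.Chars.slice
      (((PySem.List.pyRange 0 (rn : Int) 1).foldl
        (fun (st : List Char × List Char) (_i : Int) =>
          (st.1 ++ PySem.Chars.slice st.2 none (some 4) ++ [' '], PySem.Chars.slice st.2 (some 4) none))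
        ([], List.replicate ((((rn : Int)) * 4).toNat - (PySem.Int.toBinChars (m : Int)).length) '0'
              ++ PySem.Int.toBinChars (m : Int))).1) none (some (-1)))
    = PySem.Str.join " " ((PySem.List.pyRange ((rn : Int) - 1) (-1) (-1)).map (nibbleGroup (m : Int))) := by
  have htb : PySem.Int.toBinChars (m : Int) = bits m := toBinChars_natCast m
  have hw : (((rn : Int)) * 4).toNat = 4 * rn := by omega
  have hbins : List.replicate ((((rn : Int)) * 4).toNat - (PySem.Int.toBinChars (m : Int)).length) '0'
      ++ PySem.Int.toBinChars (m : Int) = pbits (4 * rn) m := by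
    rw [htb, hw]
    exact pad_bits (4 * rn) m (by omega) hm
  rw [hbins, loopA]
  have hlenrange : (PySem.List.pyRange 0 (rn : Int) 1).length = rn := by
    rw [PySem.List.length_pyRange_one]
    omega
  rw [hlenrange, PySem.Chars.slice, PySem.List.slice_to_neg_one]
  simp only [List.nil_append]
  rw [chop_pbits, dropLast_join _ (groupsL_ne_nil rn m hrn)]
  rw [PySem.Str.join]
  congr 1
  rw [show (" ").toList = [' '] by rfl]
  congr 1
  rw [← bgroups_eq rn m]
  simp

-- ===== VERDICT (by name: the statement is the Claim_ definition above) =====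
theorem rbin_spec : Claim_equal_rbin := by
  unfold Claim_equal_rbin
  intro a _
  simp only [Spec_rbin, rbin, rbin_alt]
  set l : Int := if a ≠ 0 then (PySem.Int.bitLength a : Int) - 1 else 0 with hl
  have hl0 : 0 ≤ l := by
    rw [hl]
    split_ifs with h
    · have : 1 ≤ PySem.Int.bitLength a := by
        by_contra hb
        have hb0 : PySem.Int.bitLength a = 0 := by omega
        have := PySem.Int.lt_two_pow_bitLength a
        rw [hb0] at this
        simp at this
        exact h (by omega)
      omega
    · omega
  set r : Int := PySem.Int.floordiv l 4 + 1 + 1 with hr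
  have hfd : 0 ≤ PySem.Int.floordiv l 4 := by
    have := (PySem.Int.le_floordiv_iff_mul_le (a := l) (b := 4) (q := 0) (by omega)).mpr (by omega)
    exact this
  have hr2 : 2 ≤ r := by rw [hr]; omega
  set rn : Nat := r.toNat with hrn
  have hrcast : r = (rn : Int) := by rw [hrn]; omega
  -- the two masks are the same integer
  have hshl : ((1 : Int) <<< (4 * r).toNat) = (16 : Int) ^ r.toNat := by
    rw [Int.shiftLeft_eq]
    have h4 : (4 * r).toNat = 4 * r.toNat := by omega
    rw [h4]
    rw [show (16 : Int) = 2 ^ 4 by norm_num, ← pow_mul]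
    ring
  rw [hshl]
  -- the masked value, as a Nat below 2^(4 rn)
  have hmask16 : (16 : Int) ^ r.toNat - 1 = ((2 ^ (4 * rn) : Nat) : Int) - 1 := by
    rw [← hrn, show (16 : Int) = 2 ^ 4 by norm_num, ← pow_mul]
    push_cast
    ring_nf
  have hband := band_nonneg_le a (4 * rn)
  have hmaskeq : (16 : Int) ^ r.toNat - 1 = (((2 ^ (4 * rn) : Nat)) - 1 : Int) := by
    exact hmask16
  set a2 : Int := PySem.Int.band a ((16 : Int) ^ r.toNat - 1) with ha2
  have ha2' : 0 ≤ a2 ∧ a2 ≤ ((2 ^ (4 * rn) : Nat) - 1 : Int) := by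
    rw [ha2, hmaskeq]
    exact hband
  set m : Nat := a2.toNat with hm
  have ha2m : a2 = (m : Int) := by rw [hm]; omega
  have hmlt : m < 2 ^ (4 * rn) := by
    have h1 : (1 : Nat) ≤ 2 ^ (4 * rn) := Nat.one_le_two_pow
    have := ha2'.2
    omega
  have := core_eq rn (by omega) m hmlt
  rw [ha2m, hrcast]
  exact this
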